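-- pv_equiv track=rewrite | github.com/ir-trevi/TM-simulator | TMsimulator.py | _split_each
-- ===== SOURCE A (Python) =====
-- def _split_each(input_string: str, special_char: str) -> list[str]:
--     if special_char not in input_string:
--         return [x for x in input_string]
--     buffer_string = ""
--     return_list = []
--     for char in input_string:
--         buffer_string += char
--         if char == special_char and len(buffer_string) < 2:
--             continue
--         else:
--             return_list.append(buffer_string)
--             buffer_string = ""
--     return return_list
-- ===== SOURCE B (Python) =====
-- def _split_each(input_string: str, special_char: str) -> list[str]:
--     out = []
--     i = 0
--     n = len(input_string)
--     while i < n: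
--         if input_string[i] == special_char and i + 1 < n:
--             out.append(input_string[i:i + 2])
--             i += 2
--         elif input_string[i] == special_char:
--             # trailing special char with no successor: dropped (as A does)
--             i += 1
--         else:
--             out.append(input_string[i])
--             i += 1
--     return out
-- ===== Notes on version B (the rewrite author's own statement) =====
-- stated objective: simpler
-- what changed: Replaced the buffer-accumulating for-loop (plus the redundant leading 'not in' guard) by a single index-based while loop with one-character look-ahead that appends s[i:i+2] or s[i] directly.
import Mathlib
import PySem

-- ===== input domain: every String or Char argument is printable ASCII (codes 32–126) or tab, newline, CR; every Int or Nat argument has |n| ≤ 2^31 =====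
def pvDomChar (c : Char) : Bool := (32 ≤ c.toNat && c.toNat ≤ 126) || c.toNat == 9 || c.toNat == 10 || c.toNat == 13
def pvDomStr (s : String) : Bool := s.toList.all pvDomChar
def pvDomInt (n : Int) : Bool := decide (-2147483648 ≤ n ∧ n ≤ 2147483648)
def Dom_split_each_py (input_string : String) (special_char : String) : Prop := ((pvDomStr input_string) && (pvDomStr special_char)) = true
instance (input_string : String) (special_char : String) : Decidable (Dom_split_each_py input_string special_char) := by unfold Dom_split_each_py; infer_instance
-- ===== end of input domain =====

-- B replaces A's buffer-accumulating loop (and its redundant leading 'not in' guard) by a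
-- single index/look-ahead pass appending s[i:i+2] or s[i] directly; same return value, not faster.

-- ===== PORT A =====
-- one step of A's for-loop: state = (buffer_string, return_list), both as in the Python
def splitAStep (scl : List Char) (st : List Char × List String) (c : Char) : List Char × List String :=
  let buf := st.1 ++ [c]                       -- buffer_string += char
  if [c] = scl ∧ buf.length < 2 then (buf, st.2)   -- char == special_char and len(buffer_string) < 2
  else ([], st.2 ++ [String.ofList buf])           -- return_list.append(buffer_string); buffer_string = ""

def split_each_py (input_string : String) (special_char : String) : List String :=
  if !(PySem.Str.isIn special_char input_string) then   -- if special_char not in input_string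
    input_string.toList.map (fun c => String.ofList [c])    -- [x for x in input_string]
  else
    (input_string.toList.foldl (splitAStep special_char.toList) ([], [])).2

-- ===== PORT B =====
-- B's while loop over index i, advancing by 2 or 1; transcribed as recursion on the remaining chars
def splitBGo (scl : List Char) : List Char → List String
  | [] => []
  | [c] =>
    if [c] = scl then []                            -- trailing special char: dropped, i += 1
    else [String.ofList [c]]                        -- append s[i], i += 1
  | c :: d :: rest' =>
    if [c] = scl then String.ofList [c, d] :: splitBGo scl rest'   -- i + 1 < n: append s[i:i+2], i += 2
    else String.ofList [c] :: splitBGo scl (d :: rest')            -- append s[i], i += 1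

def split_each_py_alt (input_string : String) (special_char : String) : List String :=
  splitBGo special_char.toList input_string.toList

-- ===== PRECONDITION & SPEC =====
def Spec_split_each_py (input_string : String) (special_char : String) (out : List String) : Prop := out = split_each_py_alt input_string special_char
instance (input_string : String) (special_char : String) (out : List String) : Decidable (Spec_split_each_py input_string special_char out) := by unfold Spec_split_each_py; infer_instance

-- ===== CLAIM (what is proved, stated in full; the proofs are below) =====
def Claim_equal_split_each_py : Prop := ∀ (input_string : String) (special_char : String), Dom_split_each_py input_string special_char → Spec_split_each_py input_string special_char (split_each_py input_string special_char)

-- ===== LEMMAS AND PROOFS =====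

-- A's fold from an empty buffer produces B's recursion (strong induction on length,
-- consuming two characters at a time when a special char is glued to its successor)
theorem foldA_eq_splitBGo_aux (scl : List Char) (n : Nat) :
    ∀ (l : List Char) (acc : List String), l.length ≤ n →
      (l.foldl (splitAStep scl) ([], acc)).2 = acc ++ splitBGo scl l := by
  induction n with
  | zero =>
    intro l acc hl
    match l with
    | [] => simp [splitBGo]
  | succ n ih =>
    intro l acc hl
    match l with
    | [] => simp [splitBGo]
    | c :: rest =>
      by_cases hc : [c] = scl
      · -- first char is the special char: buffer holds it, look at the next char
        subst hc
        match rest with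
        | [] =>
          simp [splitAStep, splitBGo]
        | d :: rest' =>
          have h1 : splitAStep [c] ([], acc) c = ([c], acc) := by
            simp [splitAStep]
          have h2 : splitAStep [c] ([c], acc) d = ([], acc ++ [String.ofList [c, d]]) := by
            simp [splitAStep]
          have hlen : rest'.length ≤ n := by
            simp at hl; omega
          simp only [List.foldl_cons, h1, h2]
          rw [ih rest' (acc ++ [String.ofList [c, d]]) hlen]
          simp [splitBGo]
      · -- ordinary char: appended alone, buffer reset
        have h1 : splitAStep scl ([], acc) c = ([], acc ++ [String.ofList [c]]) := by
          simp [splitAStep, hc]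
        have hlen : rest.length ≤ n := by
          simp at hl; omega
        simp only [List.foldl_cons, h1]
        rw [ih rest (acc ++ [String.ofList [c]]) hlen]
        match rest with
        | [] => simp [splitBGo, hc]
        | d :: rest' => simp [splitBGo, hc]

theorem foldA_eq_splitBGo (scl : List Char) (l : List Char) :
    (l.foldl (splitAStep scl) ([], [])).2 = splitBGo scl l := by
  simpa using foldA_eq_splitBGo_aux scl l.length l [] le_rfl

-- when no single char of l equals scl, B's recursion is the plain char split
theorem splitBGo_no_special (scl : List Char) :
    ∀ l : List Char, (∀ c ∈ l, [c] ≠ scl) → splitBGo scl l = l.map (fun c => String.ofList [c])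
  | [], _ => by simp [splitBGo]
  | [c], h => by simp [splitBGo, h c (by simp)]
  | c :: d :: rest', h => by
    have ih := splitBGo_no_special scl (d :: rest') (fun x hx => h x (by simp at hx ⊢; tauto))
    simp [splitBGo, h c (by simp), ih]

-- ===== VERDICT (by name: the statement is the Claim_ definition above) =====
theorem split_each_py_spec : Claim_equal_split_each_py := by
  intro s sc _
  unfold Spec_split_each_py split_each_py split_each_py_alt
  split_ifs with hin
  · -- special_char not a substring: no char of s can equal it as a singleton
    have hin' : PySem.Chars.isIn sc.toList s.toList = false := by
      simpa [PySem.Str.isIn] using hin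
    rw [PySem.Chars.isIn_eq_false_iff] at hin'
    refine (splitBGo_no_special _ _ ?_).symm
    intro c hc hceq
    obtain ⟨pre, suf, hps⟩ := List.append_of_mem hc
    exact hin' ⟨pre, suf, by simp [← hceq, hps]⟩
  · exact foldA_eq_splitBGo sc.toList s.toList
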